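-- pv_equiv track=rewrite | github.com/AMavrodieva/SoftUni-Advanced-Python | 08-Preparation_exam/Python Advanced Exam - 24 October 2020/3. List Pureness_harder.py | best_list_pureness
-- ===== SOURCE A (Python) =====
-- def best_list_pureness(*args):
--     list_of_number = [int(x) for x in args[0]]
--     number = args[1]
--     result = ""
--     best_pureness = 0
--     rotation = 0
--     pareness_dict = {}
--     for _ in range(number+1):
--         current_pureness = 0
--         for ind, el in enumerate(list_of_number):
--             current_sum = ind * el
--             current_pureness += current_sum
--         if current_pureness not in pareness_dict:
--             pareness_dict[current_pureness] = []
--         pareness_dict[current_pureness].append(rotation)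
--         if current_pureness > best_pureness:
--             best_pureness = current_pureness
--         list_of_number.insert(0, list_of_number.pop(-1))
--         rotation += 1
--
--
--     for key, value in pareness_dict.items():
--         if key == best_pureness:
--             result = f'Best pureness {key} after {value[0]} rotations'
--             break
--     return result
-- ===== SOURCE B (Python) =====
-- def best_list_pureness(numbers, number):
--     nums = [int(x) for x in numbers]
--     n = len(nums)
--     total = sum(nums)
--     cur = sum(i * x for i, x in enumerate(nums))
--     best = 0
--     best_rot = None
--     for r in range(number + 1):
--         if cur > best:
--             best, best_rot = cur, r
--         elif cur == best and best_rot is None: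
--             best_rot = r
--         # pureness after one more right-rotation, in O(1)
--         cur += total - n * nums[(n - 1 - r) % n]
--     if best_rot is None:
--         return ""
--     return f'Best pureness {best} after {best_rot} rotations'
-- ===== Notes on version B (the rewrite author's own statement) =====
-- stated objective: faster
-- what changed: B computes each rotation's pureness in O(1) from the previous one (cur += sum - n*element_moved_to_front) and tracks the best value with its first rotation directly, instead of A's full rescan of the list per rotation plus a dict of all pureness values scanned at the end.
import Mathlib
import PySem

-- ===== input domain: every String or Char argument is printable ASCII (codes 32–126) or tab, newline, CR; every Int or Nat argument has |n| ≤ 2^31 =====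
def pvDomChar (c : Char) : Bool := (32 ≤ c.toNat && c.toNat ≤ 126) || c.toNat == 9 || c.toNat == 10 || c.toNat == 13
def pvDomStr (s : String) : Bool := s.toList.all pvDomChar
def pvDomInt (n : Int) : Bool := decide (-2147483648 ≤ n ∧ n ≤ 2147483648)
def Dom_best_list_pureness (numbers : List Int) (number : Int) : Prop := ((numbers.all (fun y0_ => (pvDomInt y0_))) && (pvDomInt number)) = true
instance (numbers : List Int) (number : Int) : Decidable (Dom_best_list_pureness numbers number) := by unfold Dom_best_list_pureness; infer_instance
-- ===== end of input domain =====

-- B updates each rotation's pureness in O(1) from the previous one instead of rescanning the whole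
-- list per rotation (A mutates only its local copy of the list, so the equality is about the return value).

-- ===== PORT A =====

-- inner loop: 'for ind, el in enumerate(list_of_number): current_pureness += ind * el'
def pvPureA (l : List Int) : Int :=
  (PySem.List.enumerate l).foldl (fun acc p => acc + p.1 * p.2) 0

-- 'list_of_number.insert(0, list_of_number.pop(-1))'; Python raises IndexError on [] (excluded by Pre_)
def pvRotA (lst : List Int) : List Int :=
  match PySem.List.pop? lst (-1) with
  | some (x, rest) => PySem.List.insert rest 0 x
  | none => lst

-- one iteration of A's main 'for _ in range(number+1)' loop over the state (list, best, rotation, dict)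
def pvStepA (s : List Int × Int × Int × PySem.Dict Int (List Int)) (_ : Int) :
    List Int × Int × Int × PySem.Dict Int (List Int) :=
  let lst := s.1
  let best := s.2.1
  let rot := s.2.2.1
  let d := s.2.2.2
  let cur := pvPureA lst
  let d1 := if d.contains cur then d else d.insert cur ([] : List Int)
  let d2 := d1.modify cur [] (fun v => v ++ [rot])
  let best' := if cur > best then cur else best
  (pvRotA lst, best', rot + 1, d2)

-- final loop: 'for key, value in pareness_dict.items(): if key == best: result = …; break'
-- value[0]: the lists stored in the dict are never empty, so Python's value[0] cannot raise; .getD 0 is never hit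
def pvFindA (items : List (Int × List Int)) (best : Int) : String :=
  match items with
  | [] => ""
  | (k, v) :: rest =>
    if k == best then
      "Best pureness " ++ PySem.Int.toStr k ++ " after " ++
        PySem.Int.toStr ((PySem.List.pyGet? v 0).getD 0) ++ " rotations"
    else pvFindA rest best

def best_list_pureness (numbers : List Int) (number : Int) : String :=
  let st := (PySem.List.pyRange 0 (number + 1) 1).foldl pvStepA
    (numbers, 0, 0, PySem.Dict.mk [])
  pvFindA st.2.2.2.items st.2.1

-- ===== PORT B =====

-- one iteration of B's loop: update (best, best_rot), then the O(1) pureness update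
-- 'cur += total - n * nums[(n - 1 - r) % n]'; the index is in range whenever n > 0 (Pre_), so .getD 0 is never hit
def pvStepB (nums : List Int) (total n : Int) (s : Int × Int × Option Int) (r : Int) :
    Int × Int × Option Int :=
  let cur := s.1
  let best := s.2.1
  let bestRot := s.2.2
  let bb := if cur > best then (cur, some r)
            else if cur == best && bestRot.isNone then (best, some r)
            else (best, bestRot)
  let cur' := cur + total - n * ((PySem.List.pyGet? nums (PySem.Int.mod (n - 1 - r) n)).getD 0)
  (cur', bb.1, bb.2)

def best_list_pureness_alt (numbers : List Int) (number : Int) : String :=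
  -- 'nums = [int(x) for x in numbers]' is the identity on a list of ints
  let n : Int := numbers.length
  let total := numbers.sum
  let cur0 := ((PySem.List.enumerate numbers).map (fun p => p.1 * p.2)).sum
  let st := (PySem.List.pyRange 0 (number + 1) 1).foldl (pvStepB numbers total n)
    (cur0, 0, (none : Option Int))
  match st.2.2 with
  | none => ""
  | some r =>
    "Best pureness " ++ PySem.Int.toStr st.2.1 ++ " after " ++ PySem.Int.toStr r ++ " rotations"

-- ===== PRECONDITION & SPEC =====
-- Pre_ excludes only numbers = [] with number ≥ 0, where Python A raises IndexError at pop(-1)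
-- (and B raises ZeroDivisionError at the modulus).
def Pre_best_list_pureness (numbers : List Int) (number : Int) : Prop :=
  numbers ≠ [] ∨ number < 0
instance (numbers : List Int) (number : Int) : Decidable (Pre_best_list_pureness numbers number) := by
  unfold Pre_best_list_pureness; infer_instance

def pvWitness_best_list_pureness : List Int × Int := ([1, 2, 3], 3)

def Spec_best_list_pureness (numbers : List Int) (number : Int) (out : String) : Prop :=
  out = best_list_pureness_alt numbers number
instance (numbers : List Int) (number : Int) (out : String) : Decidable (Spec_best_list_pureness numbers number out) := by
  unfold Spec_best_list_pureness; infer_instance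

-- ===== CLAIM (what is proved, stated in full; the proofs are below) =====
def Claim_equal_best_list_pureness : Prop :=
  ∀ (numbers : List Int) (number : Int), Dom_best_list_pureness numbers number →
    Pre_best_list_pureness numbers number →
    Spec_best_list_pureness numbers number (best_list_pureness numbers number)

-- ===== LEMMAS AND PROOFS =====

-- weighted sum Σ (s+i)·l i, the common value of A's inner loop and B's running pureness
def pvS (s : Int) (l : List Int) : Int :=
  ((PySem.List.enumerate l s).map (fun p => p.1 * p.2)).sum

-- offset of the rotated list after k right-rotations: A's list is numbers.drop (pvM k) ++ numbers.take (pvM k)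
def pvM (numbers : List Int) (k : Nat) : Nat :=
  ((-(k : Int)) % (numbers.length : Int)).toNat

lemma pvPureA_eq_pvS (l : List Int) : pvPureA l = pvS 0 l := by
  simpa [pvPureA, pvS] using
    PySem.List.foldl_add (PySem.List.enumerate l 0) (fun p => p.1 * p.2) 0

lemma pvS_cons (s : Int) (x : Int) (l : List Int) :
    pvS s (x :: l) = s * x + pvS (s + 1) l := by
  simp [pvS, PySem.List.enumerate_cons]

lemma pvS_shift (l : List Int) (s : Int) : pvS (s + 1) l = pvS s l + l.sum := by
  induction l generalizing s with
  | nil => simp [pvS]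
  | cons x t ih =>
    rw [pvS_cons, pvS_cons, ih (s + 1), ih s, List.sum_cons]; ring

lemma pvS_append_singleton (s : Int) (l : List Int) (x : Int) :
    pvS s (l ++ [x]) = pvS s l + (s + (l.length : Int)) * x := by
  simp [pvS, PySem.List.enumerate_append, PySem.List.enumerate_cons]

lemma pvS_rot (init : List Int) (x : Int) :
    pvS 0 (x :: init) =
      pvS 0 (init ++ [x]) + (init ++ [x]).sum - ((init ++ [x]).length : Int) * x := by
  rw [pvS_cons, pvS_shift, pvS_append_singleton]
  simp
  ring

lemma pvRotA_append (init : List Int) (x : Int) : pvRotA (init ++ [x]) = x :: init := by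
  unfold pvRotA
  rw [PySem.List.pop?_last]
  simp [PySem.List.insert_zero]

-- arithmetic of the rotation offset
lemma emod_sub_one (n a : Int) (hn : 0 < n) :
    (a - 1) % n = if a % n = 0 then n - 1 else a % n - 1 := by
  have h0 : 0 ≤ a % n := Int.emod_nonneg a (by omega)
  have h1 : a % n < n := Int.emod_lt_of_pos a hn
  by_cases hz : a % n = 0
  · rw [if_pos hz]
    by_cases hn1 : n = 1
    · subst hn1; simp
    · have h1n : (1 : Int) % n = 1 := Int.emod_eq_of_lt (by omega) (by omega)
      rw [Int.sub_emod, hz, h1n]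
      have e1 : (n - 1) % n = (-1 : Int) % n := by
        rw [show n - 1 = -1 + n * 1 by ring, Int.add_mul_emod_self_left]
      have e2 : (n - 1) % n = n - 1 := Int.emod_eq_of_lt (by omega) (by omega)
      rw [show (0 : Int) - 1 = -1 by ring, ← e1, e2]
  · rw [if_neg hz]
    have hn2 : 2 ≤ n := by
      by_contra hc
      have : n = 1 := by omega
      subst this
      simp at hz
    have h1n : (1 : Int) % n = 1 := Int.emod_eq_of_lt (by omega) (by omega)
    rw [Int.sub_emod, h1n]
    exact Int.emod_eq_of_lt (by omega) (by omega)

lemma pvM_lt (numbers : List Int) (hne : numbers ≠ []) (k : Nat) :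
    pvM numbers k < numbers.length := by
  have hn : 0 < numbers.length := List.length_pos_of_ne_nil hne
  have hnz : (0 : Int) < (numbers.length : Int) := by exact_mod_cast hn
  have h1 : (-(k : Int)) % (numbers.length : Int) < (numbers.length : Int) :=
    Int.emod_lt_of_pos _ hnz
  have h0 : 0 ≤ (-(k : Int)) % (numbers.length : Int) := Int.emod_nonneg _ (by omega)
  unfold pvM
  omega

lemma pvM_succ (numbers : List Int) (hne : numbers ≠ []) (k : Nat) :
    pvM numbers (k + 1) =
      if pvM numbers k = 0 then numbers.length - 1 else pvM numbers k - 1 := by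
  have hn : 0 < numbers.length := List.length_pos_of_ne_nil hne
  have hnz : (0 : Int) < (numbers.length : Int) := by exact_mod_cast hn
  have e : (-(↑(k + 1) : Int)) = (-(k : Int)) - 1 := by push_cast; ring
  have h0 : 0 ≤ (-(k : Int)) % (numbers.length : Int) := Int.emod_nonneg _ (by omega)
  have h1 : (-(k : Int)) % (numbers.length : Int) < (numbers.length : Int) :=
    Int.emod_lt_of_pos _ hnz
  unfold pvM
  rw [e, emod_sub_one _ _ hnz]
  split_ifs <;> omega

lemma pvIdx_eq (numbers : List Int) (hne : numbers ≠ []) (k : Nat) :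
    PySem.Int.mod ((numbers.length : Int) - 1 - (k : Int)) (numbers.length : Int) =
      (pvM numbers (k + 1) : Int) := by
  have hn : 0 < numbers.length := List.length_pos_of_ne_nil hne
  have hnz : (0 : Int) < (numbers.length : Int) := by exact_mod_cast hn
  rw [PySem.Int.mod_eq_emod_of_pos hnz]
  rw [show (numbers.length : Int) - 1 - (k : Int) = (-(k : Int) - 1) + (numbers.length : Int) * 1 by ring,
    Int.add_mul_emod_self_left]
  have h0 : 0 ≤ (-(k : Int) - 1) % (numbers.length : Int) := Int.emod_nonneg _ (by omega)
  unfold pvM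
  rw [show (-(↑(k + 1) : Int)) = -(k : Int) - 1 by push_cast; ring]
  omega

lemma rot_sum (numbers : List Int) (M : Nat) :
    (numbers.drop M ++ numbers.take M).sum = numbers.sum := by
  rw [List.sum_append, add_comm, ← List.sum_append, List.take_append_drop]

lemma rot_length (numbers : List Int) (M : Nat) :
    (numbers.drop M ++ numbers.take M).length = numbers.length := by
  simp
  omega

-- one right-rotation of the rotated list: decomposition 'init ++ [x]' with x the element that moves to the front
lemma rot_decomp (numbers : List Int) (M M' : Nat) (hM : M < numbers.length)
    (hlt : M' < numbers.length)
    (hM' : M' = if M = 0 then numbers.length - 1 else M - 1) :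
    ∃ init : List Int,
      numbers.drop M ++ numbers.take M = init ++ [numbers[M']'(by omega)] ∧
      numbers.drop M' ++ numbers.take M' = numbers[M']'(by omega) :: init := by
  by_cases h0 : M = 0
  · subst h0
    have hM'v : M' = numbers.length - 1 := by simpa using hM'
    subst hM'v
    refine ⟨numbers.dropLast, ?_, ?_⟩
    · have := List.dropLast_append_getLast (l := numbers) (by intro h; simp [h] at hM)
      rw [List.getLast_eq_getElem] at this
      simpa using this.symm
    · have hd : numbers.drop (numbers.length - 1) =
          numbers[numbers.length - 1]'(by omega) :: numbers.drop (numbers.length - 1 + 1) :=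
        List.drop_eq_getElem_cons (by omega)
      rw [hd, show numbers.length - 1 + 1 = numbers.length by omega, List.drop_length]
      rw [List.dropLast_eq_take]
      rfl
  · have hM'v : M' = M - 1 := by simp [h0] at hM'; exact hM'
    subst hM'v
    refine ⟨numbers.drop M ++ numbers.take (M - 1), ?_, ?_⟩
    · have ht : numbers.take M = numbers.take (M - 1) ++ [numbers[M - 1]'(by omega)] := by
        have := List.take_add_one (l := numbers) (i := M - 1)
        rw [show M - 1 + 1 = M by omega] at this
        rw [this, List.getElem?_eq_getElem (by omega)]
        rfl
      rw [List.append_assoc] at *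
      rw [ht]
    · have hd : numbers.drop (M - 1) =
          numbers[M - 1]'(by omega) :: numbers.drop (M - 1 + 1) :=
        List.drop_eq_getElem_cons (by omega)
      rw [hd, show M - 1 + 1 = M by omega]
      rfl

-- the invariant tying A's state to B's state after k iterations
def pvInv (numbers : List Int) (k : Nat)
    (a : List Int × Int × Int × PySem.Dict Int (List Int)) (b : Int × Int × Option Int) : Prop :=
  a.1 = numbers.drop (pvM numbers k) ++ numbers.take (pvM numbers k) ∧
  a.2.2.1 = (k : Int) ∧
  b.1 = pvS 0 a.1 ∧
  a.2.1 = b.2.1 ∧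
  (∀ key ∈ a.2.2.2.keys, key ≤ a.2.1) ∧
  (match b.2.2 with
   | some r => ∃ tl, a.2.2.2.get? b.2.1 = some (r :: tl)
   | none => b.2.1 = 0 ∧ a.2.2.2.contains 0 = false)

lemma pvGet?_modify_self {κ ν : Type} [BEq κ] [LawfulBEq κ]
    (d : PySem.Dict κ ν) (k : κ) (d0 : ν) (f : ν → ν) :
    (d.modify k d0 f).get? k = some (f (d.getD k d0)) := by
  unfold PySem.Dict.modify
  exact PySem.Dict.get?_insert_self d k _

lemma pvGet?_modify_of_ne {κ ν : Type} [BEq κ] [LawfulBEq κ]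
    (d : PySem.Dict κ ν) {k k' : κ} (d0 : ν) (f : ν → ν) (h : k' ≠ k) :
    (d.modify k d0 f).get? k' = d.get? k' := by
  unfold PySem.Dict.modify
  exact PySem.Dict.get?_insert_of_ne d _ h

lemma step_inv (numbers : List Int) (hne : numbers ≠ []) (k : Nat)
    (a : List Int × Int × Int × PySem.Dict Int (List Int)) (b : Int × Int × Option Int)
    (h : pvInv numbers k a b) :
    pvInv numbers (k + 1) (pvStepA a (k : Int))
      (pvStepB numbers numbers.sum (numbers.length : Int) b (k : Int)) := by
  obtain ⟨lst, best, rot, d⟩ := a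
  obtain ⟨cur, bestB, rotB⟩ := b
  obtain ⟨hlst, hrot, hcur, hbest, hkeys, hdict⟩ := h
  dsimp only at hlst hrot hcur hbest hkeys hdict
  have hn : 0 < numbers.length := List.length_pos_of_ne_nil hne
  have hM : pvM numbers k < numbers.length := pvM_lt numbers hne k
  have hM'lt : pvM numbers (k + 1) < numbers.length := pvM_lt numbers hne (k + 1)
  obtain ⟨init, hdec1, hdec2⟩ :=
    rot_decomp numbers (pvM numbers k) (pvM numbers (k + 1)) hM hM'lt (pvM_succ numbers hne k)
  have hidx : (PySem.List.pyGet? numbers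
      (PySem.Int.mod ((numbers.length : Int) - 1 - (k : Int)) (numbers.length : Int))).getD 0 =
      numbers[pvM numbers (k + 1)]'hM'lt := by
    rw [pvIdx_eq numbers hne k]
    simp [PySem.List.pyGet?, PySem.List.pyIdx?, hM'lt]
  have hpA : pvPureA lst = cur := by rw [pvPureA_eq_pvS, ← hcur]
  have hLlst : lst = init ++ [numbers[pvM numbers (k + 1)]'hM'lt] := by rw [hlst, hdec1]
  have hrotA : pvRotA lst =
      numbers.drop (pvM numbers (k + 1)) ++ numbers.take (pvM numbers (k + 1)) := by
    rw [hLlst, pvRotA_append, hdec2]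
  have hsum : (init ++ [numbers[pvM numbers (k + 1)]'hM'lt]).sum = numbers.sum := by
    rw [← hdec1]; exact rot_sum numbers _
  have hlen : ((init ++ [numbers[pvM numbers (k + 1)]'hM'lt]).length : Int) =
      (numbers.length : Int) := by
    rw [← hdec1]; exact_mod_cast rot_length numbers (pvM numbers k)
  unfold pvInv
  dsimp only [pvStepA, pvStepB]
  rw [hbest] at hkeys
  rw [hpA, hrot, hbest]
  refine ⟨hrotA, by push_cast; ring, ?_, ?_, ?_, ?_⟩
  · -- the O(1) pureness update equals the pureness of the rotated list
    rw [hidx, hrotA, hdec2, pvS_rot, hsum, hlen, ← hLlst, ← hcur]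
  · -- best components agree
    by_cases hgt : cur > bestB
    · simp only [if_pos hgt]
    · simp only [if_neg hgt]
      by_cases he : (cur == bestB && rotB.isNone) = true
      · simp only [if_pos he]
      · simp only [if_neg he]
  · -- every key of the dict stays ≤ the new best
    intro key hk
    rw [PySem.Dict.keys_modify, PySem.Dict.mem_keys_insert] at hk
    have hkey : key = cur ∨ key ∈ d.keys := by
      rcases hk with h | h
      · exact Or.inl h
      · by_cases hc : d.contains cur = true
        · rw [if_pos hc] at h; exact Or.inr h
        · rw [if_neg hc, PySem.Dict.mem_keys_insert] at h; tauto
    by_cases hgt : cur > bestB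
    · simp only [if_pos hgt]
      rcases hkey with h | h
      · omega
      · have := hkeys key h; omega
    · simp only [if_neg hgt]
      rcases hkey with h | h
      · omega
      · exact hkeys key h
  · -- the dict's first-occurrence entry for the best matches B's best_rot
    by_cases hgt : cur > bestB
    · -- strictly better pureness: fresh key, recorded at rotation k
      have hnc : ¬ (d.contains cur = true) := by
        cases hcb : d.contains cur with
        | false => simp
        | true =>
          exact absurd (hkeys cur ((PySem.Dict.contains_iff_mem_keys d cur).mp hcb)) (by omega)
      simp only [if_pos hgt, if_neg hnc]
      refine ⟨[], ?_⟩
      rw [pvGet?_modify_self, PySem.Dict.getD_insert_self]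
      rfl
    · simp only [if_neg hgt]
      by_cases he : (cur == bestB && rotB.isNone) = true
      · -- cur = bestB = 0 and 0 was never seen: first occurrence recorded at rotation k
        simp only [if_pos he]
        obtain ⟨hbeq, hno⟩ := (Bool.and_eq_true _ _).mp he
        have heq : cur = bestB := by exact_mod_cast eq_of_beq hbeq
        have hnone : rotB = none := by
          cases rotB
          · rfl
          · simp [Option.isNone] at hno
        rw [hnone] at hdict
        obtain ⟨hb0, hc0⟩ := hdict
        have hnc : ¬ (d.contains cur = true) := by rw [heq, hb0, hc0]; simp
        simp only [if_neg hnc]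
        refine ⟨[], ?_⟩
        rw [← heq, pvGet?_modify_self, PySem.Dict.getD_insert_self]
        rfl
      · -- no change to the best entry
        simp only [if_neg he]
        cases rotB with
        | some r =>
          obtain ⟨tl, hget⟩ := hdict
          by_cases heq : cur = bestB
          · -- a tie with the current best: the rotation list gains k at the back, head unchanged
            have hc : d.contains cur = true := by
              cases hcb : d.contains cur with
              | false =>
                have hnone : d.get? bestB = none :=
                  (PySem.Dict.get?_eq_none_iff_contains d bestB).mpr (heq ▸ hcb)
                rw [hnone] at hget
                cases hget
              | true => rfl
            simp only [if_pos hc]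
            refine ⟨tl ++ [(k : Int)], ?_⟩
            rw [← heq, pvGet?_modify_self]
            unfold PySem.Dict.getD
            rw [heq, hget]
            rfl
          · have hneq : bestB ≠ cur := fun h => heq h.symm
            refine ⟨tl, ?_⟩
            rw [pvGet?_modify_of_ne _ _ _ hneq]
            by_cases hc : d.contains cur = true
            · rw [if_pos hc]; exact hget
            · rw [if_neg hc, PySem.Dict.get?_insert_of_ne _ _ hneq]; exact hget
        | none =>
          obtain ⟨hb0, hc0⟩ := hdict
          have hneq : cur ≠ bestB := by
            intro hcb
            exact he (by simp [hcb])
          refine ⟨hb0, ?_⟩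
          rw [PySem.Dict.contains_modify]
          have h0c : ((0 : Int) == cur) = false := by
            rw [beq_eq_false_iff_ne]
            rw [hb0] at hneq
            exact fun h => hneq h.symm
          by_cases hc : d.contains cur = true
          · rw [if_pos hc, h0c, hc0]
            rfl
          · rw [if_neg hc, PySem.Dict.contains_insert, h0c, hc0]
            rfl

lemma run_inv (numbers : List Int) (hne : numbers ≠ []) (k : Nat) :
    pvInv numbers k
      ((PySem.List.pyRange 0 (k : Int) 1).foldl pvStepA (numbers, 0, 0, PySem.Dict.mk []))
      ((PySem.List.pyRange 0 (k : Int) 1).foldl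
        (pvStepB numbers numbers.sum (numbers.length : Int))
        (((PySem.List.enumerate numbers).map (fun p => p.1 * p.2)).sum, 0, none)) := by
  induction k with
  | zero =>
    rw [show ((0 : Nat) : Int) = 0 by norm_num, PySem.List.pyRange_one_eq_nil (le_refl 0)]
    refine ⟨?_, rfl, rfl, rfl, ?_, ⟨rfl, rfl⟩⟩
    · simp [pvM]
    · intro key hk
      simp [PySem.Dict.keys] at hk
  | succ k ih =>
    rw [show ((k + 1 : Nat) : Int) = (k : Int) + 1 by push_cast; ring,
      PySem.List.pyRange_one_succ_right (Int.natCast_nonneg k),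
      List.foldl_append, List.foldl_append]
    simp only [List.foldl_cons, List.foldl_nil]
    exact step_inv numbers hne k _ _ ih

lemma pvFindA_eq_get? (items : List (Int × List Int)) (best : Int) :
    pvFindA items best =
      (match (PySem.Dict.mk items).get? best with
       | none => ""
       | some v =>
         "Best pureness " ++ PySem.Int.toStr best ++ " after " ++
           PySem.Int.toStr ((PySem.List.pyGet? v 0).getD 0) ++ " rotations") := by
  induction items with
  | nil => simp [pvFindA, PySem.Dict.get?]
  | cons p rest ih =>
    obtain ⟨k, v⟩ := p
    rw [PySem.Dict.get?_mk_cons]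
    by_cases hkb : (k == best) = true
    · have : k = best := by exact_mod_cast eq_of_beq hkb
      subst this
      simp [pvFindA]
    · simp only [pvFindA, hkb, if_false, Bool.false_eq_true]
      rw [ih]

-- ===== VERDICT (by name: the statement is the Claim_ definition above) =====
theorem best_list_pureness_spec : Claim_equal_best_list_pureness := by
  intro numbers number _hDom hPre
  unfold Spec_best_list_pureness best_list_pureness best_list_pureness_alt
  by_cases hnum : number + 1 ≤ 0
  · rw [PySem.List.pyRange_one_eq_nil hnum]
    simp [pvFindA]
  · have hne : numbers ≠ [] := by
      rcases hPre with h | h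
      · exact h
      · omega
    have hk : number + 1 = (((number + 1).toNat : Nat) : Int) := by omega
    rw [hk]
    have H := run_inv numbers hne (number + 1).toNat
    obtain ⟨h1, h2, h3, h4, h5, h6⟩ := H
    rw [pvFindA_eq_get?, h4]
    dsimp only
    rcases hrot : ((PySem.List.pyRange 0 (((number + 1).toNat : Nat) : Int) 1).foldl
        (pvStepB numbers numbers.sum (numbers.length : Int))
        (((PySem.List.enumerate numbers).map (fun p => p.1 * p.2)).sum, 0, none)).2.2 with _ | r
    · rw [hrot] at h6
      obtain ⟨hb0, hc⟩ := h6
      rw [hrot, hb0, (PySem.Dict.get?_eq_none_iff_contains _ _).mpr hc]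
    · rw [hrot] at h6
      obtain ⟨tl, hget⟩ := h6
      rw [hrot, hget]
      simp [PySem.List.pyGet?, PySem.List.pyIdx?]
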